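-- pv_equiv track=rewrite | github.com/alsgkals2/Study | [Python]Coding_Prectice/복습하기/이분탐색-입국심사.py | solution
-- ===== SOURCE A (Python) =====
-- def solution(n, times):
--     answer = 0
--     times.sort()
--     val_min = times[0]
--     val_max = times[-1]*n
--
--     while (val_min <= val_max):
--         t = (val_min+val_max)//2
--         people = sum([t//_t for _t in times])
--         if people>=n:
--             answer = t
--             val_max = t-1
--         elif people<n:
--             val_min = t+1
--     return answer
-- ===== SOURCE B (Python) =====
-- def solution(n, times):
--     # Recursive binary-search decomposition: min/max instead of sorting (no
--     # argument mutation, unlike A which sorts `times` in place; return value only),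
--     # and the accepted midpoint is threaded back through the recursion
--     # (None = nothing accepted) instead of an `answer` accumulator.
--     lo0 = min(times)
--     hi0 = max(times) * n
--
--     def go(lo, hi):
--         if lo > hi:
--             return None
--         mid = (lo + hi) // 2
--         if sum(mid // t for t in times) >= n:
--             deeper = go(lo, mid - 1)
--             return mid if deeper is None else deeper
--         return go(mid + 1, hi)
--
--     r = go(lo0, hi0)
--     return 0 if r is None else r
-- ===== Notes on version B (the rewrite author's own statement) =====
-- stated objective: alternative
-- what changed: B drops A's in-place sort (it reads min(times) and max(times) instead, mutating nothing) and replaces the imperative while-loop binary search with an `answer` accumulator by a pure recursive descent that returns the accepted midpoint as an Option, a deeper accepted midpoint overriding a shallower one.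
import Mathlib
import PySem

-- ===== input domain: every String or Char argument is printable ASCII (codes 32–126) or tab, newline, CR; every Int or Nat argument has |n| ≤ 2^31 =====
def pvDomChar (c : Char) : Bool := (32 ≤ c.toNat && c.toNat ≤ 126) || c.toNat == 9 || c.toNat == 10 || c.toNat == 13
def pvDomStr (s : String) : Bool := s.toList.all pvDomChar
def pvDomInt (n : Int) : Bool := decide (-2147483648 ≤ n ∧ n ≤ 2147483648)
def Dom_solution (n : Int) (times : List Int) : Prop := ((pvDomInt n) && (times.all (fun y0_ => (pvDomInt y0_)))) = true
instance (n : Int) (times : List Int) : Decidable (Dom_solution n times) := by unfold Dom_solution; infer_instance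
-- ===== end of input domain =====

-- B replaces A's sort + while-loop-with-answer-accumulator binary search by min/max extraction
-- plus a pure recursive descent threading the accepted midpoint back as an Option; same cost.
-- Side effect: A sorts `times` in place, B does not mutate it — the equivalence is about the return value.

-- ===== PORT A =====
-- A's sum([t//_t for _t in times]) (over the sorted list)
def peopleSumA (t : Int) (xs : List Int) : Int :=
  (xs.map (fun _t => PySem.Int.floordiv t _t)).sum

-- the `while (val_min <= val_max)` loop, state (val_min, val_max, answer); iterates over ts (A sorted `times` before the loop)
def solutionLoop (n : Int) (ts : List Int) (vmin vmax answer : Int) : Int :=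
  if h : vmin ≤ vmax then
    let t := PySem.Int.floordiv (vmin + vmax) 2
    let people := peopleSumA t ts
    if people ≥ n then
      solutionLoop n ts vmin (t - 1) t
    else
      solutionLoop n ts (t + 1) vmax answer
  else answer
termination_by (vmax + 1 - vmin).toNat
decreasing_by
  · have hb := PySem.Int.floordiv_two_mid_bounds (lo := vmin) (hi := vmax) h
    omega
  · have hb := PySem.Int.floordiv_two_mid_bounds (lo := vmin) (hi := vmax) h
    omega

def solution (n : Int) (times : List Int) : Int :=
  let ts := PySem.List.sorted times (fun x => x) false
  match PySem.List.pyGet? ts 0, PySem.List.pyGet? ts (-1) with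
  | some vmin, some vlast => solutionLoop n ts vmin (vlast * n) 0
  | _, _ => 0  -- times == []: Python raises IndexError here; excluded by Pre_

-- ===== PORT B =====
-- B's sum(mid // t for t in times)
def peopleSumB (mid : Int) (xs : List Int) : Int :=
  (xs.map (fun t => PySem.Int.floordiv mid t)).sum

-- recursive descent: none = no midpoint accepted yet; an accepted mid is kept unless a deeper one overrides it
def solutionGo (n : Int) (times : List Int) (lo hi : Int) : Option Int :=
  if h : lo > hi then none
  else
    let mid := PySem.Int.floordiv (lo + hi) 2
    if peopleSumB mid times ≥ n then
      match solutionGo n times lo (mid - 1) with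
      | none => some mid
      | some d => some d
    else solutionGo n times (mid + 1) hi
termination_by (hi + 1 - lo).toNat
decreasing_by
  · have hb := PySem.Int.floordiv_two_mid_bounds (lo := lo) (hi := hi) (by omega)
    omega
  · have hb := PySem.Int.floordiv_two_mid_bounds (lo := lo) (hi := hi) (by omega)
    omega

def solution_alt (n : Int) (times : List Int) : Int :=
  match PySem.List.min? times (fun x => x) with
  | none => 0  -- times == []: Python min() raises ValueError here; excluded by Pre_
  | some lo0 =>
      match PySem.List.max? times (fun x => x) with
      | none => 0
      | some mx =>
          match solutionGo n times lo0 (mx * n) with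
          | none => 0
          | some r => r

-- ===== PRECONDITION & SPEC =====
-- Pre_ excludes exactly the inputs where Python A raises: the empty list (IndexError on times[0]),
-- and lists containing 0 whose search interval is nonempty (min <= max*n), where the first loop
-- iteration's sum divides by zero (ZeroDivisionError); B raises on exactly the same inputs.
def Pre_solution (n : Int) (times : List Int) : Prop :=
  times ≠ [] ∧ ((0 : Int) ∈ times → (times.max?.getD 0) * n < times.min?.getD 0)
instance (n : Int) (times : List Int) : Decidable (Pre_solution n times) := by
  unfold Pre_solution; infer_instance

def pvWitness_solution : Int × List Int := (6, [7, 10])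

def Spec_solution (n : Int) (times : List Int) (out : Int) : Prop := out = solution_alt n times
instance (n : Int) (times : List Int) (out : Int) : Decidable (Spec_solution n times out) := by
  unfold Spec_solution; infer_instance

-- ===== CLAIM (what is proved, stated in full; the proofs are below) =====
def Claim_equal_solution : Prop := ∀ (n : Int) (times : List Int), Dom_solution n times → Pre_solution n times → Spec_solution n times (solution n times)

-- ===== LEMMAS AND PROOFS =====

-- A's loop and B's recursion agree step for step: same midpoint, and the sums agree because
-- A's sorted list is a permutation of `times`.
theorem loop_eq_go (n : Int) (ts times : List Int) (hperm : ts.Perm times) :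
    ∀ (lo hi ans : Int),
      solutionLoop n ts lo hi ans =
        (match solutionGo n times lo hi with | none => ans | some v => v) := by
  intro lo hi ans
  induction lo, hi, ans using solutionLoop.induct n ts with
  | case1 lo hi ans hle t people hp ih =>
      simp only [t, people] at hp ih
      have hsum : peopleSumA (PySem.Int.floordiv (lo + hi) 2) ts
          = peopleSumB (PySem.Int.floordiv (lo + hi) 2) times := by
        unfold peopleSumA peopleSumB
        exact (hperm.map _).sum_eq
      rw [solutionLoop, solutionGo]
      simp only [dif_pos hle, dif_neg (by omega : ¬ lo > hi)]
      rw [if_pos hp, if_pos (hsum ▸ hp), ih]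
      cases solutionGo n times lo (PySem.Int.floordiv (lo + hi) 2 - 1) <;> rfl
  | case2 lo hi ans hle t people hp ih =>
      simp only [t, people] at hp ih
      have hsum : peopleSumA (PySem.Int.floordiv (lo + hi) 2) ts
          = peopleSumB (PySem.Int.floordiv (lo + hi) 2) times := by
        unfold peopleSumA peopleSumB
        exact (hperm.map _).sum_eq
      rw [solutionLoop, solutionGo]
      simp only [dif_pos hle, dif_neg (by omega : ¬ lo > hi)]
      rw [if_neg hp, if_neg (hsum ▸ hp)]
      exact ih
  | case3 lo hi ans hgt =>
      rw [solutionLoop, solutionGo]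
      simp only [dif_neg hgt, dif_pos (by omega : lo > hi)]

theorem pairwise_le_getLast :
    ∀ (l : List Int) (h : l ≠ []), l.Pairwise (· ≤ ·) → ∀ x ∈ l, x ≤ l.getLast h := by
  intro l
  induction l with
  | nil => intro h; exact absurd rfl h
  | cons a t ih =>
      intro h hp x hx
      rcases List.pairwise_cons.mp hp with ⟨ha, ht⟩
      cases t with
      | nil =>
          rcases List.mem_singleton.mp hx with rfl
          simp
      | cons b u =>
          rw [List.getLast_cons (by simp : (b :: u) ≠ [])]
          rcases List.mem_cons.mp hx with rfl | hx'
          · exact ha _ (List.getLast_mem _)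
          · exact ih (by simp) ht x hx'

-- head of the ascending sort = value of min(times); last = value of max(times)
theorem sorted_head_last (times : List Int) (h : times ≠ []) :
    ∃ (hs : PySem.List.sorted times (fun x => x) false ≠ []),
      PySem.List.min? times (fun x => x) =
        some ((PySem.List.sorted times (fun x => x) false).head hs) ∧
      PySem.List.max? times (fun x => x) =
        some ((PySem.List.sorted times (fun x => x) false).getLast hs) := by
  have hperm : (PySem.List.sorted times (fun x => x) false).Perm times :=
    PySem.List.sorted_perm times (fun x => x) false
  have hs : PySem.List.sorted times (fun x => x) false ≠ [] := by
    intro he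
    exact h (List.Perm.nil_eq (he ▸ hperm)).symm
  refine ⟨hs, ?_, ?_⟩
  · -- min
    obtain ⟨m, hm⟩ : ∃ m, PySem.List.min? times (fun x => x) = some m := by
      cases he : PySem.List.min? times (fun x => x) with
      | none => exact absurd ((PySem.List.min?_eq_none_iff _ _).mp he) h
      | some m => exact ⟨m, rfl⟩
    rw [hm]
    have hmmem : m ∈ times := PySem.List.min?_mem hm
    have hmin : ∀ y ∈ times, m ≤ y := PySem.List.min?_isMin hm
    have hhead_mem : (PySem.List.sorted times (fun x => x) false).head hs ∈ times :=
      hperm.mem_iff.mp (List.head_mem hs)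
    obtain ⟨b, tl, hbt⟩ := List.exists_cons_of_ne_nil hs
    have hhead : (PySem.List.sorted times (fun x => x) false).head hs = b := by
      simp [hbt]
    have hle : ∀ y ∈ times, (PySem.List.sorted times (fun x => x) false).head hs ≤ y := by
      rw [hhead]
      simpa using PySem.List.key_head_sorted_le (xs := times) (key := fun x => x) hbt
    exact congrArg some (le_antisymm (hmin _ hhead_mem) (hle m hmmem))
  · -- max
    obtain ⟨m, hm⟩ : ∃ m, PySem.List.max? times (fun x => x) = some m := by
      cases he : PySem.List.max? times (fun x => x) with
      | none => exact absurd ((PySem.List.max?_eq_none_iff _ _).mp he) h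
      | some m => exact ⟨m, rfl⟩
    rw [hm]
    have hmmem : m ∈ times := PySem.List.max?_mem hm
    have hmax : ∀ y ∈ times, y ≤ m := PySem.List.max?_isMax hm
    have hlast_mem : (PySem.List.sorted times (fun x => x) false).getLast hs ∈ times :=
      hperm.mem_iff.mp (List.getLast_mem hs)
    have hpw : (PySem.List.sorted times (fun x => x) false).Pairwise (· ≤ ·) := by
      have := PySem.List.sorted_pairwise (xs := times) (key := fun x => x)
      simpa using this
    have hge : ∀ y ∈ times, y ≤ (PySem.List.sorted times (fun x => x) false).getLast hs := by
      intro y hy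
      exact pairwise_le_getLast _ hs hpw y (hperm.mem_iff.mpr hy)
    exact congrArg some (le_antisymm (hge m hmmem) (hmax _ hlast_mem))

-- ===== VERDICT (by name: the statement is the Claim_ definition above) =====
theorem solution_spec : Claim_equal_solution := by
  intro n times _ hpre
  obtain ⟨hne, -⟩ := hpre
  simp only [Spec_solution, solution, solution_alt]
  obtain ⟨hs, hmin, hmax⟩ := sorted_head_last times hne
  have hperm : (PySem.List.sorted times (fun x => x) false).Perm times :=
    PySem.List.sorted_perm times (fun x => x) false
  rw [hmin, hmax]
  rw [PySem.List.pyGet?_zero, PySem.List.pyGet?_neg_one]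
  have h0 : (PySem.List.sorted times (fun x => x) false)[0]?
      = some ((PySem.List.sorted times (fun x => x) false).head hs) := by
    rw [← List.head?_eq_getElem?]
    exact List.head?_eq_some_head hs
  have hL : (PySem.List.sorted times (fun x => x) false).getLast?
      = some ((PySem.List.sorted times (fun x => x) false).getLast hs) := by
    exact List.getLast?_eq_some_getLast hs
  rw [h0, hL]
  show solutionLoop n (PySem.List.sorted times (fun x => x) false)
      ((PySem.List.sorted times (fun x => x) false).head hs)
      ((PySem.List.sorted times (fun x => x) false).getLast hs * n) 0
    = match solutionGo n times ((PySem.List.sorted times (fun x => x) false).head hs)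
        ((PySem.List.sorted times (fun x => x) false).getLast hs * n) with
      | none => 0
      | some r => r
  rw [loop_eq_go n _ times hperm]
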